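-- pv_equiv track=rewrite | github.com/s0xphie/0x | supersingularity/eisenstein.py | build_lattice_order
-- ===== SOURCE A (Python) =====
-- AxialSite = tuple[int, int]
--
-- def axial_distance(q: int, r: int, center_q: int, center_r: int) -> int:
--     dq = q - center_q
--     dr = r - center_r
--     return max(abs(dq), abs(dr), abs(dq + dr))
--
-- def build_lattice_order(size: int) -> list[AxialSite]:
--     center = size // 2
--     cells: list[tuple[int, int, int, int]] = []
--     for q in range(size):
--         for r in range(size):
--             dq = q - center
--             dr = r - center
--             dist = axial_distance(q, r, center, center)
--             # Deterministic radial ordering is more stable than the old hash-based tie break.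
--             cells.append((dist, dq + dr, dr, dq))
--     cells.sort()
--     return [(center + dq, center + dr) for _, _, dr, dq in cells]
-- ===== SOURCE B (Python) =====
-- def build_lattice_order(size: int) -> list[tuple[int, int]]:
--     center = size // 2
--     nbuckets = size + 1 if size > 0 else 0
--     buckets = [[] for _ in range(nbuckets)]
--     for q in range(size):
--         for r in range(size):
--             dq = q - center
--             dr = r - center
--             dist = max(abs(dq), abs(dr), abs(dq + dr))
--             buckets[dist].append((dq + dr, dr, dq))
--     out = []
--     for bucket in buckets:
--         bucket.sort()
--         out.extend((center + dq, center + dr) for _, dr, dq in bucket)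
--     return out
-- ===== Notes on version B (the rewrite author's own statement) =====
-- stated objective: alternative
-- what changed: Replaces the single global sort of (dist, dq+dr, dr, dq) cell tuples by a two-pass distribution sort: cells are first dropped into per-ring buckets indexed by their radial distance, then each ring's bucket is sorted by the secondary key (dq+dr, dr, dq) and the rings are emitted in ascending distance order.
import Mathlib
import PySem

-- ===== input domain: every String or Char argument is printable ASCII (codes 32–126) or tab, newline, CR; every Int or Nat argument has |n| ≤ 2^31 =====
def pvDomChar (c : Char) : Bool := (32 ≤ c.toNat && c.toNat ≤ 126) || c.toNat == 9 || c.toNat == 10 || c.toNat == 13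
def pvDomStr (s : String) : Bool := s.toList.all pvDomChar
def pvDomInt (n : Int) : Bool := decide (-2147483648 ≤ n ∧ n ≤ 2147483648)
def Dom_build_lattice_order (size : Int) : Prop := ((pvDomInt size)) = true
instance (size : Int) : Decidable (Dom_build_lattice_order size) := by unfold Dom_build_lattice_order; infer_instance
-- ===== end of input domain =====

-- B replaces A's single global sort of the (dist, dq+dr, dr, dq) cell tuples by a two-pass distribution sort:
-- cells go into per-ring buckets indexed by radial distance, then each ring is sorted by the
-- secondary key and the rings are emitted in ascending distance order (objective: alternative).

-- Python tuple comparison is lexicographic; the ports sort with an (injective) lexicographic key.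
def key3 (t : Int × Int × Int) : Int ×ₗ Int ×ₗ Int := toLex (t.1, toLex (t.2.1, t.2.2))
def key4 (c : Int × Int × Int × Int) : Int ×ₗ Int ×ₗ Int ×ₗ Int := toLex (c.1, key3 c.2)

-- ===== PORT A =====
def axial_distance (q r center_q center_r : Int) : Int :=
  let dq := q - center_q
  let dr := r - center_r
  max (max |dq| |dr|) |dq + dr|

def build_lattice_order (size : Int) : List (Int × Int) :=
  let center := PySem.Int.floordiv size 2
  let cells : List (Int × Int × Int × Int) :=
    (PySem.List.pyRange 0 size 1).foldl (fun acc q =>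
      (PySem.List.pyRange 0 size 1).foldl (fun acc r =>
        let dq := q - center
        let dr := r - center
        let dist := axial_distance q r center center
        acc ++ [(dist, dq + dr, dr, dq)]) acc) []
  (PySem.List.sorted cells key4 false).map (fun c => (center + c.2.2.2, center + c.2.2.1))

-- ===== PORT B =====
def build_lattice_order_alt (size : Int) : List (Int × Int) :=
  let center := PySem.Int.floordiv size 2
  let nbuckets : Nat := if 0 < size then (size + 1).toNat else 0
  let buckets : List (List (Int × Int × Int)) :=
    (PySem.List.pyRange 0 size 1).foldl (fun bs q =>
      (PySem.List.pyRange 0 size 1).foldl (fun bs r =>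
        let dq := q - center
        let dr := r - center
        let dist := max (max |dq| |dr|) |dq + dr|
        bs.modify dist.toNat (· ++ [(dq + dr, dr, dq)])) bs) (List.replicate nbuckets [])
  buckets.foldl (fun out b =>
    out ++ (PySem.List.sorted b key3 false).map (fun t => (center + t.2.2, center + t.2.1))) []

-- ===== PRECONDITION & SPEC =====
def Spec_build_lattice_order (size : Int) (out : List (Int × Int)) : Prop := out = build_lattice_order_alt size
instance (size : Int) (out : List (Int × Int)) : Decidable (Spec_build_lattice_order size out) := by unfold Spec_build_lattice_order; infer_instance

-- ===== CLAIM (what is proved, stated in full; the proofs are below) =====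
def Claim_equal_build_lattice_order : Prop := ∀ (size : Int), Dom_build_lattice_order size → Spec_build_lattice_order size (build_lattice_order size)

-- ===== LEMMAS AND PROOFS =====

-- proof-only abbreviations: primary key (ring distance), secondary data, and the full cell tuple
def pkey (c : Int) (p : Int × Int) : Int := max (max |p.1 - c| |p.2 - c|) |p.1 - c + (p.2 - c)|
def pval (c : Int) (p : Int × Int) : Int × Int × Int := (p.1 - c + (p.2 - c), p.2 - c, p.1 - c)
def cellf (c : Int) (p : Int × Int) : Int × Int × Int × Int := (pkey c p, pval c p)

theorem key3_injective : Function.Injective key3 := by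
  intro a b h
  simp only [key3] at h
  have h' := toLex.injective h
  rw [Prod.mk.injEq] at h'
  obtain ⟨h1, h2⟩ := h'
  have h2' := toLex.injective h2
  rw [Prod.mk.injEq] at h2'
  exact Prod.ext h1 (Prod.ext h2'.1 h2'.2)

theorem pval_injective (c : Int) : Function.Injective (pval c) := by
  intro a b h
  simp only [pval, Prod.mk.injEq] at h
  obtain ⟨-, h2, h3⟩ := h
  exact Prod.ext (by omega) (by omega)

-- a nested loop over two ranges is a single loop over their product
theorem foldl2_product {α β γ : Type} (l1 : List α) (l2 : List β) (f : γ → α → β → γ) (init : γ) :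
    l1.foldl (fun acc a => l2.foldl (fun acc b => f acc a b) acc) init
      = (l1 ×ˢ l2).foldl (fun acc p => f acc p.1 p.2) init := by
  induction l1 generalizing init with
  | nil => simp
  | cons a l1 ih => simp [List.product_cons, List.foldl_append, List.foldl_map, ih]

theorem modify_map_range {V : Type} (nb k : Nat) (F : Nat → V) (g : V → V) :
    ((List.range nb).map F).modify k g
      = (List.range nb).map (fun d => if d = k then g (F d) else F d) := by
  apply List.ext_getElem
  · simp
  · intro j h1 h2
    simp only [List.getElem_modify, List.getElem_map, List.getElem_range]
    by_cases hj : k = j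
    · simp [hj]
    · rw [if_neg hj, if_neg (fun h => hj h.symm)]

-- distributing elements into buckets by key = per-key filter
theorem buckets_foldl {C V : Type} (key : C → Int) (val : C → V) (nb : Nat) (L : List C)
    (h : ∀ c ∈ L, 0 ≤ key c ∧ key c < (nb : Int)) (P : List C) :
    L.foldl (fun bs c => bs.modify (key c).toNat (· ++ [val c]))
        ((List.range nb).map (fun (d : Nat) => (P.filter (fun c => key c = (d : Int))).map val))
      = (List.range nb).map (fun (d : Nat) => ((P ++ L).filter (fun c => key c = (d : Int))).map val) := by
  induction L generalizing P with
  | nil => simp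
  | cons c L ih =>
    have hc := h c (by simp)
    simp only [List.foldl_cons]
    rw [modify_map_range]
    have hstep : (fun (d : Nat) => if d = (key c).toNat
          then ((P.filter (fun x => key x = (d : Int))).map val) ++ [val c]
          else (P.filter (fun x => key x = (d : Int))).map val)
        = fun (d : Nat) => ((P ++ [c]).filter (fun x => key x = (d : Int))).map val := by
      funext d
      by_cases hd : d = (key c).toNat
      · subst hd
        have : key c = ((key c).toNat : Int) := by omega
        simp [List.filter_append, ← this]
      · have : ¬ (key c = (d : Int)) := by omega
        simp [List.filter_append, this, hd]
    rw [hstep, ih (fun x hx => h x (by simp [hx])) (P ++ [c])]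
    simp

theorem flatMap_ite_cons_perm {C : Type} (ds : List Int) (hnd : ds.Nodup) (c : C) (k : Int)
    (hk : k ∈ ds) (G : Int → List C) :
    (ds.flatMap (fun d => if k = d then c :: G d else G d)).Perm (c :: ds.flatMap G) := by
  induction ds with
  | nil => simp at hk
  | cons d ds ih =>
    rcases List.nodup_cons.mp hnd with ⟨hd, hnd'⟩
    by_cases hkd : k = d
    · subst hkd
      have : ∀ d' ∈ ds, (if k = d' then c :: G d' else G d') = G d' := by
        intro d' hd'; rw [if_neg]; rintro rfl; exact hd hd'
      simp only [List.flatMap_cons]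
      rw [List.flatMap_congr this]
      simp
    · have hk' : k ∈ ds := by rcases List.mem_cons.mp hk with h | h; exact absurd h hkd; exact h
      simp only [List.flatMap_cons, if_neg hkd]
      exact ((List.Perm.append_left _ (ih hnd' hk')).trans List.perm_middle)

-- the concatenation of the per-key filters is a permutation of the list
theorem flatMap_filter_perm {C : Type} (key : C → Int) (nb : Nat) (L : List C)
    (h : ∀ c ∈ L, 0 ≤ key c ∧ key c < (nb : Int)) :
    ((List.range nb).flatMap (fun (d : Nat) => L.filter (fun c => key c = (d : Int)))).Perm L := by
  induction L with
  | nil => simp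
  | cons c L ihL =>
    have hc := h c (by simp)
    have hL : ∀ x ∈ L, 0 ≤ key x ∧ key x < (nb : Int) := fun x hx => h x (by simp [hx])
    have hstep : ∀ d : Nat, (c :: L).filter (fun x => key x = (d : Int))
        = if key c = (d : Int) then c :: L.filter (fun x => key x = (d : Int))
          else L.filter (fun x => key x = (d : Int)) := by
      intro d
      by_cases hcd : key c = (d : Int) <;> simp [hcd]
    rw [List.flatMap_congr (fun d _ => hstep d)]
    have hmap : (List.range nb).flatMap
          (fun (d : Nat) => if key c = (d : Int) then c :: L.filter (fun x => key x = (d : Int))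
            else L.filter (fun x => key x = (d : Int)))
        = ((List.range nb).map (fun (d : Nat) => (d : Int))).flatMap
          (fun d => if key c = d then c :: L.filter (fun x => key x = d)
            else L.filter (fun x => key x = d)) := by
      rw [List.flatMap_map]
    rw [hmap]
    have hnd : ((List.range nb).map (fun (d : Nat) => (d : Int))).Nodup :=
      List.nodup_range.map (fun a b => by exact_mod_cast id)
    have hkmem : key c ∈ (List.range nb).map (fun (d : Nat) => (d : Int)) := by
      simp only [List.mem_map, List.mem_range]
      exact ⟨(key c).toNat, by omega, by omega⟩
    refine (flatMap_ite_cons_perm _ hnd c (key c) hkmem _).trans ?_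
    refine List.Perm.cons c ?_
    have := List.flatMap_map (f := fun (d : Nat) => (d : Int))
      (g := fun d => L.filter (fun x => key x = d)) (l := List.range nb)
    rw [this]
    exact ihL hL

theorem pyRange_nodup (s : Int) : (PySem.List.pyRange 0 s 1).Nodup := by
  by_cases hs : 0 ≤ s
  · obtain ⟨n, rfl⟩ := Int.eq_ofNat_of_zero_le hs
    rw [PySem.List.pyRange_zero_natCast]
    exact List.nodup_range.map (fun a b => by exact_mod_cast id)
  · have : PySem.List.pyRange 0 s 1 = [] := by
      apply List.eq_nil_iff_forall_not_mem.mpr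
      intro x hx
      have := PySem.List.mem_pyRange_one.mp hx
      omega
    simp [this]

theorem pkey_bounds (s : Int) (hs : 0 < s) (p : Int × Int)
    (hp : p ∈ (PySem.List.pyRange 0 s 1) ×ˢ (PySem.List.pyRange 0 s 1)) :
    0 ≤ pkey (PySem.Int.floordiv s 2) p ∧ pkey (PySem.Int.floordiv s 2) p < (((s + 1).toNat : Nat) : Int) := by
  rcases List.mem_product.mp hp with ⟨hq, hr⟩
  rcases PySem.List.mem_pyRange_one.mp hq with ⟨hq0, hq1⟩
  rcases PySem.List.mem_pyRange_one.mp hr with ⟨hr0, hr1⟩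
  have hc : PySem.Int.floordiv s 2 = s / 2 := PySem.Int.floordiv_eq_ediv_of_pos (by norm_num)
  rw [pkey, hc]
  constructor
  · exact le_trans (abs_nonneg _) (le_trans (le_max_left _ _) (le_max_left _ _))
  · have h1 : |p.1 - s / 2| ≤ s - 1 := by rw [abs_le]; omega
    have h2 : |p.2 - s / 2| ≤ s - 1 := by rw [abs_le]; omega
    have h3 : |p.1 - s / 2 + (p.2 - s / 2)| ≤ s := by rw [abs_le]; omega
    have h4 : ((s + 1).toNat : Int) = s + 1 := by omega
    rw [h4]
    rcases max_cases (max |p.1 - s / 2| |p.2 - s / 2|) |p.1 - s / 2 + (p.2 - s / 2)| with ⟨he, _⟩ | ⟨he, _⟩ <;>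
      rcases max_cases |p.1 - s / 2| |p.2 - s / 2| with ⟨he2, _⟩ | ⟨he2, _⟩ <;> omega

-- the flattened ring-by-ring output is A's global sort
theorem sorted_cells_eq (s : Int) (hs : 0 < s) :
    PySem.List.sorted ((((PySem.List.pyRange 0 s 1) ×ˢ (PySem.List.pyRange 0 s 1)).map (cellf (PySem.Int.floordiv s 2)))) key4
      = (List.range (s + 1).toNat).flatMap (fun (d : Nat) =>
          (PySem.List.sorted (((((PySem.List.pyRange 0 s 1) ×ˢ (PySem.List.pyRange 0 s 1)).filter
              (fun p => pkey (PySem.Int.floordiv s 2) p = (d : Int))).map (pval (PySem.Int.floordiv s 2)))) key3).map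
            (fun t => (((d : Int), t) : Int × Int × Int × Int))) := by
  have hbnd : ∀ p ∈ (PySem.List.pyRange 0 s 1) ×ˢ (PySem.List.pyRange 0 s 1),
      0 ≤ pkey (PySem.Int.floordiv s 2) p ∧ pkey (PySem.Int.floordiv s 2) p < (((s + 1).toNat : Nat) : Int) :=
    fun p hp => pkey_bounds s hs p hp
  have hprodnd : ((PySem.List.pyRange 0 s 1) ×ˢ (PySem.List.pyRange 0 s 1)).Nodup :=
    (pyRange_nodup s).product (pyRange_nodup s)
  apply PySem.List.sorted_eq_of_perm_of_pairwise_lt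
  · -- the flattened rings are a permutation of the cell list
    have hblock : ∀ d : Nat, List.Perm
        (((PySem.List.sorted ((((PySem.List.pyRange 0 s 1) ×ˢ (PySem.List.pyRange 0 s 1)).filter
            (fun p => pkey (PySem.Int.floordiv s 2) p = (d : Int))).map (pval (PySem.Int.floordiv s 2))) key3).map
          (fun t => (((d : Int), t) : Int × Int × Int × Int))))
        ((((PySem.List.pyRange 0 s 1) ×ˢ (PySem.List.pyRange 0 s 1)).map (cellf (PySem.Int.floordiv s 2))).filter
          (fun x => x.1 = (d : Int))) := by
      intro d
      refine ((PySem.List.sorted_perm _ _ _).map _).trans ?_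
      rw [List.map_map]
      have h2 : ((((PySem.List.pyRange 0 s 1) ×ˢ (PySem.List.pyRange 0 s 1)).filter
            (fun p => pkey (PySem.Int.floordiv s 2) p = (d : Int))).map
            ((fun t => (((d : Int), t) : Int × Int × Int × Int)) ∘ pval (PySem.Int.floordiv s 2)))
          = ((((PySem.List.pyRange 0 s 1) ×ˢ (PySem.List.pyRange 0 s 1)).filter
            (fun p => pkey (PySem.Int.floordiv s 2) p = (d : Int))).map (cellf (PySem.Int.floordiv s 2))) := by
        apply List.map_congr_left
        intro p hp
        have hpk := (List.mem_filter.mp hp).2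
        simp only [decide_eq_true_eq] at hpk
        simp only [Function.comp, cellf, hpk]
      rw [h2]
      have h3 : ((((PySem.List.pyRange 0 s 1) ×ˢ (PySem.List.pyRange 0 s 1)).map (cellf (PySem.Int.floordiv s 2))).filter
            (fun x => x.1 = (d : Int)))
          = ((((PySem.List.pyRange 0 s 1) ×ˢ (PySem.List.pyRange 0 s 1)).filter
            (fun p => pkey (PySem.Int.floordiv s 2) p = (d : Int))).map (cellf (PySem.Int.floordiv s 2))) := by
        rw [List.filter_map]
        rfl
      rw [h3]
    refine (List.Perm.flatMap (List.Perm.refl _) (fun d _ => hblock d)).trans ?_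
    exact flatMap_filter_perm (fun x : Int × Int × Int × Int => x.1) ((s + 1).toNat)
      (((PySem.List.pyRange 0 s 1) ×ˢ (PySem.List.pyRange 0 s 1)).map (cellf (PySem.Int.floordiv s 2)))
      (by intro x hx; rcases List.mem_map.mp hx with ⟨p, hp, rfl⟩; exact hbnd p hp)
  · -- the flattened rings are strictly increasing in the 4-tuple key
    rw [List.pairwise_flatMap]
    constructor
    · intro d _
      rw [List.pairwise_map]
      have hnd : (((((PySem.List.pyRange 0 s 1) ×ˢ (PySem.List.pyRange 0 s 1)).filter
            (fun p => pkey (PySem.Int.floordiv s 2) p = (d : Int))).map (pval (PySem.Int.floordiv s 2)))).Nodup :=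
        (hprodnd.filter _).map (pval_injective _)
      have hndsorted := ((PySem.List.sorted_perm _ key3 false).nodup_iff).mpr hnd
      refine ((PySem.List.sorted_pairwise _ key3).and hndsorted).imp ?_
      rintro a b ⟨hab, hne⟩
      have hlt : key3 a < key3 b := lt_of_le_of_ne hab (fun h => hne (key3_injective h))
      rw [show key4 (((d : Int), a)) = toLex ((d : Int), key3 a) from rfl,
          show key4 (((d : Int), b)) = toLex ((d : Int), key3 b) from rfl, Prod.Lex.lt_iff]
      exact Or.inr ⟨rfl, by simpa using hlt⟩
    · refine List.pairwise_lt_range.imp ?_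
      intro d1 d2 hlt x hx y hy
      rcases List.mem_map.mp hx with ⟨t, -, rfl⟩
      rcases List.mem_map.mp hy with ⟨u, -, rfl⟩
      rw [show key4 (((d1 : Int), t)) = toLex ((d1 : Int), key3 t) from rfl,
          show key4 (((d2 : Int), u)) = toLex ((d2 : Int), key3 u) from rfl, Prod.Lex.lt_iff]
      exact Or.inl (by simpa using hlt)

-- ===== VERDICT (by name: the statement is the Claim_ definition above) =====
theorem build_lattice_order_spec : Claim_equal_build_lattice_order := by
  intro size _
  unfold Spec_build_lattice_order
  by_cases hs : 0 < size
  · have hA : build_lattice_order size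
        = (List.range ((size + 1).toNat)).flatMap (fun (d : Nat) =>
            (PySem.List.sorted ((((PySem.List.pyRange 0 size 1) ×ˢ (PySem.List.pyRange 0 size 1)).filter
                (fun p => pkey (PySem.Int.floordiv size 2) p = (d : Int))).map (pval (PySem.Int.floordiv size 2))) key3).map
              (fun t => (PySem.Int.floordiv size 2 + t.2.2, PySem.Int.floordiv size 2 + t.2.1))) := by
      simp only [build_lattice_order, axial_distance]
      rw [foldl2_product, PySem.List.foldl_append_singleton_eq_map, List.nil_append]
      rw [show (fun (p : Int × Int) => (max (max |p.1 - PySem.Int.floordiv size 2| |p.2 - PySem.Int.floordiv size 2|)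
              |p.1 - PySem.Int.floordiv size 2 + (p.2 - PySem.Int.floordiv size 2)|,
              p.1 - PySem.Int.floordiv size 2 + (p.2 - PySem.Int.floordiv size 2),
              p.2 - PySem.Int.floordiv size 2, p.1 - PySem.Int.floordiv size 2))
            = cellf (PySem.Int.floordiv size 2) from rfl]
      rw [sorted_cells_eq size hs, List.map_flatMap]
      simp only [List.map_map]
      rfl
    have hB : build_lattice_order_alt size
        = (List.range ((size + 1).toNat)).flatMap (fun (d : Nat) =>
            (PySem.List.sorted ((((PySem.List.pyRange 0 size 1) ×ˢ (PySem.List.pyRange 0 size 1)).filter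
                (fun p => pkey (PySem.Int.floordiv size 2) p = (d : Int))).map (pval (PySem.Int.floordiv size 2))) key3).map
              (fun t => (PySem.Int.floordiv size 2 + t.2.2, PySem.Int.floordiv size 2 + t.2.1))) := by
      simp only [build_lattice_order_alt, if_pos hs]
      rw [foldl2_product]
      rw [show List.replicate ((size + 1).toNat) ([] : List (Int × Int × Int))
            = (List.range ((size + 1).toNat)).map (fun (d : Nat) =>
                ((([] : List (Int × Int)).filter (fun p => pkey (PySem.Int.floordiv size 2) p = (d : Int))).map
                  (pval (PySem.Int.floordiv size 2))) ) by simp]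
      rw [show (fun (acc : List (List (Int × Int × Int))) (p : Int × Int) =>
            acc.modify (max (max |p.1 - PySem.Int.floordiv size 2| |p.2 - PySem.Int.floordiv size 2|)
                |p.1 - PySem.Int.floordiv size 2 + (p.2 - PySem.Int.floordiv size 2)|).toNat
              (· ++ [(p.1 - PySem.Int.floordiv size 2 + (p.2 - PySem.Int.floordiv size 2),
                p.2 - PySem.Int.floordiv size 2, p.1 - PySem.Int.floordiv size 2)]))
          = (fun (bs : List (List (Int × Int × Int))) (p : Int × Int) =>
            bs.modify (pkey (PySem.Int.floordiv size 2) p).toNat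
              (· ++ [pval (PySem.Int.floordiv size 2) p])) from rfl]
      rw [buckets_foldl (pkey (PySem.Int.floordiv size 2)) (pval (PySem.Int.floordiv size 2))
            ((size + 1).toNat) _ (fun p hp => pkey_bounds size hs p hp) []]
      rw [PySem.List.foldl_append_eq_flatMap, List.nil_append, List.flatMap_map]
      rfl
    rw [hA, hB]
  · have hemp : PySem.List.pyRange 0 size 1 = [] := by
      apply List.eq_nil_iff_forall_not_mem.mpr
      intro x hx
      have := PySem.List.mem_pyRange_one.mp hx
      omega
    simp [build_lattice_order, build_lattice_order_alt, hemp, hs, PySem.List.sorted]
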